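-- pv_equiv track=rewrite | github.com/yeonwoo1125/cospro-python-study | yeonwoo/answer/TV_애청자_A씨.py | solution
-- ===== SOURCE A (Python) =====
-- def solution(programs):
-- 	answer = 0
-- 	used_tv = [0] * 25
--
-- 	for program in programs:
-- 		for i in range(program[0], program[1]):
-- 			used_tv[i] = used_tv[i] + 1
--
-- 	for i in used_tv:
-- 		if i >= 2:
-- 			answer = answer + 1
-- 	return answer
-- ===== SOURCE B (Python) =====
-- def solution(programs):
--     diff = [0] * 26
--     for program in programs:
--         s, e = program[0], program[1]
--         if s < e:
--             diff[s] += 1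
--             diff[e] -= 1
--     answer = 0
--     coverage = 0
--     for i in range(25):
--         coverage += diff[i]
--         if coverage >= 2:
--             answer += 1
--     return answer
-- ===== Notes on version B (the rewrite author's own statement) =====
-- stated objective: alternative
-- what changed: Replaces A's per-hour fill of every interval plus a separate counting pass with a difference array: +1/-1 boundary marks per program, then one 25-step prefix-sum sweep that counts hours with coverage >= 2.
-- outside the precondition, e.g. on solution([[-3, 5], [20, 25]]): A returns 3, B returns 0
import Mathlib
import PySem

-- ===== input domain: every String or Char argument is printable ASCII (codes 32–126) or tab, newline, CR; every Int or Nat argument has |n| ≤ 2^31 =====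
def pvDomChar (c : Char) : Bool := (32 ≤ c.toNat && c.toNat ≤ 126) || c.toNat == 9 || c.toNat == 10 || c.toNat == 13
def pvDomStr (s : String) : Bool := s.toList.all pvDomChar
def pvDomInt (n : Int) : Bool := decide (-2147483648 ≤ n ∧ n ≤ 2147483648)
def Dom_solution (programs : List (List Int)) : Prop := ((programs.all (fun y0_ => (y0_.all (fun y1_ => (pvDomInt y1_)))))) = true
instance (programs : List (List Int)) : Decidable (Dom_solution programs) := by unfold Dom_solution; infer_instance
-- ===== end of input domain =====

-- B replaces A's per-hour fill of every interval with a difference array (+1/-1 boundary marks)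
-- and one 25-step prefix-sum sweep: a different algorithm of similar measured cost.

-- ===== PORT A =====
def solution (programs : List (List Int)) : Int :=
  let used_tv := programs.foldl
    (fun used_tv program =>
      (PySem.List.pyRange (PySem.List.pyGetD program 0 0) (PySem.List.pyGetD program 1 0) 1).foldl
        (fun used_tv i => PySem.List.pySetD used_tv i (PySem.List.pyGetD used_tv i 0 + 1)) used_tv)
    (List.replicate 25 (0 : Int))
  used_tv.foldl (fun answer i => if i ≥ 2 then answer + 1 else answer) 0

-- ===== PORT B =====
def solution_alt (programs : List (List Int)) : Int :=
  let diff := programs.foldl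
    (fun diff program =>
      if PySem.List.pyGetD program 0 0 < PySem.List.pyGetD program 1 0 then
        PySem.List.pySetD
          (PySem.List.pySetD diff (PySem.List.pyGetD program 0 0)
            (PySem.List.pyGetD diff (PySem.List.pyGetD program 0 0) 0 + 1))
          (PySem.List.pyGetD program 1 0)
          (PySem.List.pyGetD
            (PySem.List.pySetD diff (PySem.List.pyGetD program 0 0)
              (PySem.List.pyGetD diff (PySem.List.pyGetD program 0 0) 0 + 1))
            (PySem.List.pyGetD program 1 0) 0 - 1)
      else diff)
    (List.replicate 26 (0 : Int))
  ((PySem.List.pyRange 0 25 1).foldl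
    (fun (st : Int × Int) i =>
      (if st.2 + PySem.List.pyGetD diff i 0 ≥ 2 then st.1 + 1 else st.1,
       st.2 + PySem.List.pyGetD diff i 0))
    (0, 0)).1

-- ===== PRECONDITION & SPEC =====
-- Pre_ excludes programs with fewer than 2 entries (A raises IndexError on program[1]) and
-- nonempty intervals not contained in hours 0..25: past 25 or below -25 A raises IndexError,
-- and for starts in -25..-1 A's wraparound into the end of the day (Python negative indexing)
-- and B's own wrapped value are both accidents outside the task's hour domain — no one would
-- specify either, so those inputs are excluded.
def Pre_solution (programs : List (List Int)) : Prop :=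
  ∀ p ∈ programs, 2 ≤ p.length ∧
    (PySem.List.pyGetD p 0 0 < PySem.List.pyGetD p 1 0 →
      0 ≤ PySem.List.pyGetD p 0 0 ∧ PySem.List.pyGetD p 1 0 ≤ 25)
instance (programs : List (List Int)) : Decidable (Pre_solution programs) := by
  unfold Pre_solution; infer_instance
def pvWitness_solution : List (List Int) := [[1, 5], [3, 8]]

def Spec_solution (programs : List (List Int)) (out : Int) : Prop := out = solution_alt programs
instance (programs : List (List Int)) (out : Int) : Decidable (Spec_solution programs out) := by unfold Spec_solution; infer_instance

-- ===== CLAIM (what is proved, stated in full; the proofs are below) =====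
def Claim_equal_solution : Prop := ∀ (programs : List (List Int)), Dom_solution programs → Pre_solution programs → Spec_solution programs (solution programs)

-- ===== LEMMAS AND PROOFS =====

-- number of programs covering hour i
def cnt (programs : List (List Int)) (i : Int) : Int :=
  ((programs.filter (fun p => decide (PySem.List.pyGetD p 0 0 ≤ i ∧ i < PySem.List.pyGetD p 1 0))).length : Int)

lemma cnt_cons (p : List Int) (ps : List (List Int)) (i : Int) :
    cnt (p :: ps) i =
      (if PySem.List.pyGetD p 0 0 ≤ i ∧ i < PySem.List.pyGetD p 1 0 then 1 else 0) + cnt ps i := by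
  by_cases h : PySem.List.pyGetD p 0 0 ≤ i ∧ i < PySem.List.pyGetD p 1 0 <;>
    simp [cnt, h] <;> omega

lemma cnt_neg (programs : List (List Int)) (hPre : Pre_solution programs) (i : Int) (hi : i < 0) :
    cnt programs i = 0 := by
  unfold cnt
  have h : programs.filter
      (fun p => decide (PySem.List.pyGetD p 0 0 ≤ i ∧ i < PySem.List.pyGetD p 1 0)) = [] := by
    rw [List.filter_eq_nil_iff]
    intro p hp
    simp only [decide_eq_true_eq, not_and]
    intro h1 h2
    have h3 := ((hPre p hp).2 (lt_of_le_of_lt h1 h2)).1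
    omega
  rw [h]; rfl

lemma getD_replicate (n j : Nat) : PySem.List.pyGetD (List.replicate n (0 : Int)) (↑j) 0 = 0 := by
  rw [PySem.List.pyGetD_natCast, List.getD_eq_getElem?_getD, List.getElem?_replicate]
  by_cases h : j < n <;> simp [h]

lemma lenInc (l : List Int) (arr : List Int) :
    (l.foldl (fun used_tv i => PySem.List.pySetD used_tv i (PySem.List.pyGetD used_tv i 0 + 1)) arr).length
      = arr.length := by
  induction l generalizing arr with
  | nil => rfl
  | cons x t ih => simp [List.foldl_cons, ih, PySem.List.length_pySetD]

lemma lenA_outer (programs : List (List Int)) (arr : List Int) :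
    (programs.foldl
      (fun used_tv program =>
        (PySem.List.pyRange (PySem.List.pyGetD program 0 0) (PySem.List.pyGetD program 1 0) 1).foldl
          (fun used_tv i => PySem.List.pySetD used_tv i (PySem.List.pyGetD used_tv i 0 + 1)) used_tv)
      arr).length = arr.length := by
  induction programs generalizing arr with
  | nil => rfl
  | cons p ps ih => simp [List.foldl_cons, ih, lenInc]

lemma incRange_aux : ∀ (n : Nat) (s e : Int) (arr : List Int) (j : Nat),
    j < arr.length → 0 ≤ s → e ≤ (arr.length : Int) → (e - s).toNat = n →
    PySem.List.pyGetD
        ((PySem.List.pyRange s e 1).foldl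
          (fun used_tv i => PySem.List.pySetD used_tv i (PySem.List.pyGetD used_tv i 0 + 1)) arr)
        (↑j) 0
      = PySem.List.pyGetD arr (↑j) 0 + (if s ≤ (j : Int) ∧ (j : Int) < e then 1 else 0) := by
  intro n
  induction n with
  | zero =>
    intro s e arr j hj hs he hn
    rw [PySem.List.pyRange_one_eq_nil (by omega)]
    have h : ¬ (s ≤ (j : Int) ∧ (j : Int) < e) := by omega
    simp [h]
  | succ n ih =>
    intro s e arr j hj hs he hn
    have hlt : s < e := by omega
    rw [PySem.List.pyRange_one_cons hlt]
    simp only [List.foldl_cons]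
    have hsn : s = ((s.toNat : Nat) : Int) := (Int.toNat_of_nonneg hs).symm
    have hlen' : (PySem.List.pySetD arr s (PySem.List.pyGetD arr s 0 + 1)).length = arr.length :=
      PySem.List.length_pySetD ..
    rw [ih (s + 1) e _ j (by omega) (by omega) (by rw [hlen']; exact he) (by omega)]
    have hset : PySem.List.pyGetD (PySem.List.pySetD arr s (PySem.List.pyGetD arr s 0 + 1)) (↑j) 0
        = if j = s.toNat then PySem.List.pyGetD arr (↑s.toNat) 0 + 1
          else PySem.List.pyGetD arr (↑j) 0 := by
      rw [hsn]
      exact PySem.List.pyGetD_pySetD_natCast arr s.toNat j _ 0 (by omega)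
    rw [hset]
    by_cases hjs : j = s.toNat
    · rw [if_pos hjs, hjs]
      split_ifs <;> omega
    · rw [if_neg hjs]
      split_ifs <;> omega

lemma A_fold : ∀ (programs : List (List Int)) (arr : List Int), arr.length = 25 →
    Pre_solution programs → ∀ (j : Nat), j < 25 →
    PySem.List.pyGetD
        (programs.foldl
          (fun used_tv program =>
            (PySem.List.pyRange (PySem.List.pyGetD program 0 0) (PySem.List.pyGetD program 1 0) 1).foldl
              (fun used_tv i => PySem.List.pySetD used_tv i (PySem.List.pyGetD used_tv i 0 + 1)) used_tv)
          arr)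
        (↑j) 0
      = PySem.List.pyGetD arr (↑j) 0 + cnt programs (↑j) := by
  intro programs
  induction programs with
  | nil => intro arr _ _ j hj; simp [cnt]
  | cons p ps ih =>
    intro arr hlen hPre j hj
    simp only [List.foldl_cons]
    have hPre' : Pre_solution ps := fun q hq => hPre q (List.mem_cons_of_mem _ hq)
    have hp := hPre p (List.mem_cons_self ..)
    rw [ih _ (by rw [lenInc]; exact hlen) hPre' j hj, cnt_cons]
    by_cases hse : PySem.List.pyGetD p 0 0 < PySem.List.pyGetD p 1 0
    · obtain ⟨h0s, he25⟩ := hp.2 hse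
      rw [incRange_aux (PySem.List.pyGetD p 1 0 - PySem.List.pyGetD p 0 0).toNat
        (PySem.List.pyGetD p 0 0) (PySem.List.pyGetD p 1 0) arr j (by omega) h0s (by omega) rfl]
      split_ifs <;> omega
    · rw [PySem.List.pyRange_one_eq_nil (by omega)]
      simp only [List.foldl_nil]
      split_ifs <;> omega

lemma getD_diffstep (d : List Int) (a b : Int) (j : Nat) (ha0 : 0 ≤ a) (ha : a < (d.length : Int))
    (hb0 : 0 ≤ b) (hb : b < (d.length : Int)) (hab : a ≠ b) :
    PySem.List.pyGetD
        (PySem.List.pySetD (PySem.List.pySetD d a (PySem.List.pyGetD d a 0 + 1)) b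
          (PySem.List.pyGetD (PySem.List.pySetD d a (PySem.List.pyGetD d a 0 + 1)) b 0 - 1))
        (↑j) 0
      = PySem.List.pyGetD d (↑j) 0 + (if (j : Int) = a then 1 else 0)
          - (if (j : Int) = b then 1 else 0) := by
  obtain ⟨a', rfl⟩ : ∃ a' : Nat, (a' : Int) = a := ⟨a.toNat, Int.toNat_of_nonneg ha0⟩
  obtain ⟨b', rfl⟩ : ∃ b' : Nat, (b' : Int) = b := ⟨b.toNat, Int.toNat_of_nonneg hb0⟩
  rw [PySem.List.pyGetD_pySetD_natCast _ b' j _ 0 (by rw [PySem.List.length_pySetD]; omega)]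
  rw [PySem.List.pyGetD_pySetD_natCast _ a' j _ 0 (by omega),
    PySem.List.pyGetD_pySetD_natCast _ a' b' _ 0 (by omega)]
  by_cases hjb : j = b'
  · subst hjb
    have hba : ¬ (j = a') := by omega
    simp only [hba, if_false]
    split_ifs <;> omega
  · simp only [hjb, if_false]
    by_cases hja : j = a'
    · subst hja
      split_ifs <;> omega
    · simp only [hja, if_false]
      split_ifs <;> omega

lemma B_fold : ∀ (programs : List (List Int)) (d : List Int), d.length = 26 →
    Pre_solution programs → ∀ (j : Nat), j < 26 →
    PySem.List.pyGetD
        (programs.foldl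
          (fun diff program =>
            if PySem.List.pyGetD program 0 0 < PySem.List.pyGetD program 1 0 then
              PySem.List.pySetD
                (PySem.List.pySetD diff (PySem.List.pyGetD program 0 0)
                  (PySem.List.pyGetD diff (PySem.List.pyGetD program 0 0) 0 + 1))
                (PySem.List.pyGetD program 1 0)
                (PySem.List.pyGetD
                  (PySem.List.pySetD diff (PySem.List.pyGetD program 0 0)
                    (PySem.List.pyGetD diff (PySem.List.pyGetD program 0 0) 0 + 1))
                  (PySem.List.pyGetD program 1 0) 0 - 1)
            else diff)
          d)
        (↑j) 0
      = PySem.List.pyGetD d (↑j) 0 + (cnt programs (↑j) - cnt programs ((j : Int) - 1)) := by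
  intro programs
  induction programs with
  | nil => intro d _ _ j hj; simp [cnt]
  | cons p ps ih =>
    intro d hlen hPre j hj
    simp only [List.foldl_cons]
    have hPre' : Pre_solution ps := fun q hq => hPre q (List.mem_cons_of_mem _ hq)
    have hp := hPre p (List.mem_cons_self ..)
    rw [cnt_cons, cnt_cons]
    by_cases hse : PySem.List.pyGetD p 0 0 < PySem.List.pyGetD p 1 0
    · obtain ⟨h0s, he25⟩ := hp.2 hse
      rw [if_pos hse]
      rw [ih _ (by rw [PySem.List.length_pySetD, PySem.List.length_pySetD]; exact hlen) hPre' j hj]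
      rw [getD_diffstep d (PySem.List.pyGetD p 0 0) (PySem.List.pyGetD p 1 0) j h0s (by omega)
        (by omega) (by omega) (by omega)]
      split_ifs <;> omega
    · rw [if_neg hse]
      rw [ih d hlen hPre' j hj]
      split_ifs <;> omega

lemma sweep_aux (programs : List (List Int)) (D : List Int)
    (hD : ∀ j : Nat, j < 26 →
      PySem.List.pyGetD D (↑j) 0 = cnt programs (↑j) - cnt programs ((j : Int) - 1)) :
    ∀ (n : Nat) (k ans : Int), 0 ≤ k → k + n = 25 →
    ((PySem.List.pyRange k 25 1).foldl
        (fun (st : Int × Int) i =>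
          (if st.2 + PySem.List.pyGetD D i 0 ≥ 2 then st.1 + 1 else st.1,
           st.2 + PySem.List.pyGetD D i 0))
        (ans, cnt programs (k - 1))).1
      = ans + ↑(List.countP (fun i => decide (2 ≤ cnt programs i)) (PySem.List.pyRange k 25 1)) := by
  intro n
  induction n with
  | zero =>
    intro k ans hk0 hk
    rw [PySem.List.pyRange_one_eq_nil (by omega)]
    simp
  | succ n ih =>
    intro k ans hk0 hk
    rw [PySem.List.pyRange_one_cons (by omega)]
    simp only [List.foldl_cons, List.countP_cons]
    have hkc : ((k.toNat : Nat) : Int) = k := Int.toNat_of_nonneg hk0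
    have hDk := hD k.toNat (by omega)
    rw [hkc] at hDk
    rw [hDk]
    have hsum : cnt programs (k - 1) + (cnt programs k - cnt programs (k - 1)) = cnt programs k := by
      ring
    rw [hsum]
    have hnext : cnt programs k = cnt programs (k + 1 - 1) := by norm_num
    by_cases hcov : 2 ≤ cnt programs k
    · rw [if_pos (by exact hcov)]
      rw [show (ans + 1, cnt programs k) = (ans + 1, cnt programs (k + 1 - 1)) by rw [← hnext]]
      rw [ih (k + 1) (ans + 1) (by omega) (by omega)]
      simp [hcov]
      ring
    · rw [if_neg (by exact hcov)]
      rw [show (ans, cnt programs k) = (ans, cnt programs (k + 1 - 1)) by rw [← hnext]]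
      rw [ih (k + 1) ans (by omega) (by omega)]
      simp [hcov]

-- ===== VERDICT (by name: the statement is the Claim_ definition above) =====
theorem solution_spec : Claim_equal_solution := by
  intro programs _ hPre
  unfold Spec_solution
  simp only [solution, solution_alt]
  rw [PySem.List.foldl_ite_add_one (p := fun i => i ≥ 2)]
  -- characterise A's array
  have husedeq :
      (programs.foldl
        (fun used_tv program =>
          (PySem.List.pyRange (PySem.List.pyGetD program 0 0) (PySem.List.pyGetD program 1 0) 1).foldl
            (fun used_tv i => PySem.List.pySetD used_tv i (PySem.List.pyGetD used_tv i 0 + 1)) used_tv)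
        (List.replicate 25 0))
      = (PySem.List.pyRange 0 25 1).map (fun i => cnt programs i) := by
    apply List.ext_getElem
    · rw [lenA_outer, List.length_map, PySem.List.length_pyRange_one]
      simp
    · intro j h1 h2
      have hj : j < 25 := by
        have := h1; rwa [lenA_outer, List.length_replicate] at this
      rw [List.getElem_map, PySem.List.getElem_pyRange_one]
      have hval := A_fold programs (List.replicate 25 0) (by simp) hPre j hj
      rw [getD_replicate] at hval
      rw [PySem.List.pyGetD_eq_getElem _ 0 (by omega) (by exact_mod_cast h1)] at hval
      simp only [Int.toNat_natCast] at hval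
      rw [hval]
      norm_num
  simp only [husedeq, List.countP_map]
  -- characterise B's sweep
  have hdiff : ∀ j : Nat, j < 26 →
      PySem.List.pyGetD
        (programs.foldl
          (fun diff program =>
            if PySem.List.pyGetD program 0 0 < PySem.List.pyGetD program 1 0 then
              PySem.List.pySetD
                (PySem.List.pySetD diff (PySem.List.pyGetD program 0 0)
                  (PySem.List.pyGetD diff (PySem.List.pyGetD program 0 0) 0 + 1))
                (PySem.List.pyGetD program 1 0)
                (PySem.List.pyGetD
                  (PySem.List.pySetD diff (PySem.List.pyGetD program 0 0)
                    (PySem.List.pyGetD diff (PySem.List.pyGetD program 0 0) 0 + 1))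
                  (PySem.List.pyGetD program 1 0) 0 - 1)
            else diff)
          (List.replicate 26 0))
        (↑j) 0 = cnt programs (↑j) - cnt programs ((j : Int) - 1) := by
    intro j hj
    have := B_fold programs (List.replicate 26 0) (by simp) hPre j hj
    rw [getD_replicate] at this
    omega
  have hsw := sweep_aux programs _ hdiff 25 0 0 (by norm_num) (by norm_num)
  rw [cnt_neg programs hPre (0 - 1) (by norm_num)] at hsw
  rw [hsw]
  simp [Function.comp_def, ge_iff_le]
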